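-- pv_equiv track=rewrite | github.com/blankroad/agentic-dev-board | src/agentboard/docs/plan_sections.py | _replace_section
-- ===== SOURCE A (Python) =====
-- def _replace_section(original: str, heading: str, new_block: str) -> str:
--     lines = original.splitlines(keepends=True)
--     try:
--         start = next(i for i, ln in enumerate(lines) if ln.rstrip("\n") == heading)
--     except StopIteration:
--         return original + new_block
--     end = len(lines)
--     for j in range(start + 1, len(lines)):
--         if lines[j].startswith("## "):
--             end = j
--             break
--     return "".join(lines[:start]) + new_block + "".join(lines[end:])
-- ===== SOURCE B (Python) =====
-- def _replace_section(original: str, heading: str, new_block: str) -> str: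
--     # Single pass state machine: 0 = before heading, 1 = skipping old section, 2 = after boundary.
--     out = []
--     state = 0
--     for ln in original.splitlines(keepends=True):
--         if state == 0:
--             if ln.rstrip("\n") == heading:
--                 out.append(new_block)
--                 state = 1
--             else:
--                 out.append(ln)
--         elif state == 1:
--             if ln.startswith("## "):
--                 out.append(ln)
--                 state = 2
--         else:
--             out.append(ln)
--     if state == 0:
--         return original + new_block
--     return "".join(out)
-- ===== Notes on version B (the rewrite author's own statement) =====
-- stated objective: alternative
-- what changed: A finds the heading index with next(), then scans for the next '## ' boundary and rebuilds the result from list slices; B is a single pass over the kept-ends lines driven by a before/skipping/after state machine that emits pieces as it goes.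
import Mathlib
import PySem

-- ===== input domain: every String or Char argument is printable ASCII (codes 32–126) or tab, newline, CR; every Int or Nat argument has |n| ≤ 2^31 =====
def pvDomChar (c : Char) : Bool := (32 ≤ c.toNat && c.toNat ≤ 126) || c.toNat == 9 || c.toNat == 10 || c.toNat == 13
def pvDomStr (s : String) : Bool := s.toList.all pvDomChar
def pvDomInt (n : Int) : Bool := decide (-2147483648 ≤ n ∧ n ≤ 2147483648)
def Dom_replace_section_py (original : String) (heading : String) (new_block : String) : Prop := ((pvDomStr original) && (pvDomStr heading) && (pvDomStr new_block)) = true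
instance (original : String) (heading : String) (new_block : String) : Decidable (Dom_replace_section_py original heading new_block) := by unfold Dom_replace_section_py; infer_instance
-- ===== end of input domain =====

-- B replaces A's two sequential scans (find heading index, then scan for the next '## ' boundary,
-- then slice and join) by one pass over the lines driven by a before/skipping/after state machine;
-- objective: alternative decomposition, same O(n) cost.

-- ===== PORT A =====

-- original.splitlines(keepends=True): exact on the input domain (the only line-break
-- characters admitted by Dom_ are '\n', '\r' and the pair '\r\n'); PySem.Chars.splitlines
-- drops the ends, so the keepends variant is ported by hand here. Shared by both ports
-- (both Pythons call the same builtin).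
def pvSplitKE : List Char → List Char → List (List Char)
  | [], acc => if acc = [] then [] else [acc.reverse]
  | '\r' :: '\n' :: rest, acc => (acc.reverse ++ ['\r', '\n']) :: pvSplitKE rest []
  | '\n' :: rest, acc => (acc.reverse ++ ['\n']) :: pvSplitKE rest []
  | '\r' :: rest, acc => (acc.reverse ++ ['\r']) :: pvSplitKE rest []
  | c :: rest, acc => pvSplitKE rest (c :: acc)
  termination_by l _ => l.length

-- ln.rstrip("\n"): drop trailing '\n' characters (shared by both ports).
def pvRstripNl (l : List Char) : List Char :=
  (l.reverse.dropWhile (fun c => c = '\n')).reverse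

-- the heading test 'ln.rstrip("\n") == heading' and the boundary test 'ln.startswith("## ")'
def pvIsHeading (heading : List Char) (ln : List Char) : Bool := pvRstripNl ln == heading
def pvIsBoundary (ln : List Char) : Bool := PySem.Chars.startswith ln "## ".toList

-- the for-loop 'for j in range(start+1, len(lines)): if lines[j].startswith("## "): end=j; break'
-- rendered as recursion over the suffix lines[start+1:] carrying the index j; dflt = len(lines).
def pvFindEndA : List (List Char) → Nat → Nat → Nat
  | [], _, dflt => dflt
  | ln :: rest, j, dflt => if pvIsBoundary ln then j else pvFindEndA rest (j + 1) dflt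

def replace_section_py (original : String) (heading : String) (new_block : String) : String :=
  let lines := pvSplitKE original.toList []
  match lines.findIdx? (pvIsHeading heading.toList) with   -- next(i for i, ln … ) / StopIteration
  | none => String.ofList (original.toList ++ new_block.toList)  -- return original + new_block
  | some start =>
    let e := pvFindEndA (lines.drop (start + 1)) (start + 1) lines.length
    -- "".join(lines[:start]) + new_block + "".join(lines[end:])
    String.ofList ((lines.take start).flatten ++ new_block.toList ++ (lines.drop e).flatten)

-- ===== PORT B =====

-- one step of the state machine: state 0 before the heading, 1 skipping the old section, 2 after
def pvStepB (heading : List Char) (nb : List Char)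
    (s : Nat × List (List Char)) (ln : List Char) : Nat × List (List Char) :=
  match s with
  | (0, out) => if pvIsHeading heading ln then (1, out ++ [nb]) else (0, out ++ [ln])
  | (1, out) => if pvIsBoundary ln then (2, out ++ [ln]) else (1, out)
  | (st, out) => (st, out ++ [ln])

def replace_section_py_alt (original : String) (heading : String) (new_block : String) : String :=
  let r := (pvSplitKE original.toList []).foldl
             (pvStepB heading.toList new_block.toList) (0, [])
  if r.1 = 0 then String.ofList (original.toList ++ new_block.toList)
  else String.ofList r.2.flatten

-- ===== PRECONDITION & SPEC =====
def Spec_replace_section_py (original : String) (heading : String) (new_block : String) (out : String) : Prop := out = replace_section_py_alt original heading new_block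
instance (original : String) (heading : String) (new_block : String) (out : String) : Decidable (Spec_replace_section_py original heading new_block out) := by unfold Spec_replace_section_py; infer_instance

-- ===== CLAIM (what is proved, stated in full; the proofs are below) =====
def Claim_equal_replace_section_py : Prop := ∀ (original : String) (heading : String) (new_block : String), Dom_replace_section_py original heading new_block → Spec_replace_section_py original heading new_block (replace_section_py original heading new_block)

-- ===== LEMMAS AND PROOFS =====

-- in state 2 the machine just copies every remaining line
theorem pvFold2 (h nb : List Char) (L : List (List Char)) (acc : List (List Char)) :
    L.foldl (pvStepB h nb) (2, acc) = (2, acc ++ L) := by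
  induction L generalizing acc with
  | nil => simp
  | cons ln L ih => simp [pvStepB, ih]

-- in state 1 the machine drops lines until the first '## ' boundary, then copies the rest
theorem pvFold1 (h nb : List Char) (L : List (List Char)) (acc : List (List Char)) :
    L.foldl (pvStepB h nb) (1, acc) =
      match L.findIdx? pvIsBoundary with
      | none => (1, acc)
      | some k => (2, acc ++ L.drop k) := by
  induction L generalizing acc with
  | nil => simp
  | cons ln L ih =>
    by_cases hb : pvIsBoundary ln
    · simp [pvStepB, hb, List.findIdx?_cons, pvFold2]
    · simp [pvStepB, hb, List.findIdx?_cons, ih]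
      cases hL : L.findIdx? pvIsBoundary with
      | none => simp
      | some k => simp

-- full characterisation of the state machine started in state 0
theorem pvFold0 (h nb : List Char) (L : List (List Char)) (acc : List (List Char)) :
    L.foldl (pvStepB h nb) (0, acc) =
      match L.findIdx? (pvIsHeading h) with
      | none => (0, acc ++ L)
      | some s =>
        match (L.drop (s + 1)).findIdx? pvIsBoundary with
        | none => (1, acc ++ L.take s ++ [nb])
        | some k => (2, acc ++ L.take s ++ [nb] ++ (L.drop (s + 1)).drop k) := by
  induction L generalizing acc with
  | nil => simp
  | cons ln L ih =>
    by_cases hp : pvIsHeading h ln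
    · simp only [List.foldl_cons, pvStepB, hp, if_pos, List.findIdx?_cons]
      rw [pvFold1]
      cases hL : L.findIdx? pvIsBoundary with
      | none => simp [hL]
      | some k => simp [hL]
    · simp only [List.foldl_cons, pvStepB, hp, if_neg, List.findIdx?_cons, Bool.false_eq_true, not_false_iff]
      rw [ih]
      cases hL : L.findIdx? (pvIsHeading h) with
      | none => simp
      | some s =>
        cases hK : (L.drop (s + 1)).findIdx? pvIsBoundary with
        | none => simp [hK]
        | some k => simp [hK]

-- A's end-scan equals the first boundary index in the suffix (offset by j), default dflt
theorem pvFindEndA_eq (M : List (List Char)) (j dflt : Nat) :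
    pvFindEndA M j dflt =
      match M.findIdx? pvIsBoundary with
      | none => dflt
      | some k => j + k := by
  induction M generalizing j with
  | nil => simp [pvFindEndA]
  | cons ln M ih =>
    by_cases hb : pvIsBoundary ln
    · simp [pvFindEndA, hb, List.findIdx?_cons]
    · simp only [pvFindEndA, hb, if_neg, List.findIdx?_cons, Bool.false_eq_true, not_false_iff]
      rw [ih]
      cases hL : M.findIdx? pvIsBoundary with
      | none => simp
      | some k => simp [Nat.add_assoc, Nat.add_comm 1 k]

-- ===== VERDICT (by name: the statement is the Claim_ definition above) =====
theorem replace_section_py_spec : Claim_equal_replace_section_py := by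
  intro original heading new_block _
  unfold Spec_replace_section_py replace_section_py replace_section_py_alt
  simp only [pvFold0]
  cases hF : (pvSplitKE original.toList []).findIdx? (pvIsHeading heading.toList) with
  | none => simp
  | some s =>
    simp only [pvFindEndA_eq]
    cases hK : ((pvSplitKE original.toList []).drop (s + 1)).findIdx? pvIsBoundary with
    | none => simp [List.drop_length]
    | some k =>
      simp [List.drop_drop]
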